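-- pv_equiv track=rewrite | github.com/whyj107/CodeWar | 20230828_Reverse sublists of even numbers.py | rev_sub
-- ===== SOURCE A (Python) =====
-- def rev_sub(arr):
--     r = []
--     even = []
--     for a in arr:
--         if a%2 == 0:
--             even.append(a)
--         else:
--             r += even[::-1]
--             even = []
--             r.append(a)
--     r += even[::-1]
--     return r
-- ===== SOURCE B (Python) =====
-- def rev_sub(arr):
--     res = []
--     i = 0
--     n = len(arr)
--     while i < n:
--         p = arr[i] % 2 == 0
--         j = i
--         while j < n and (arr[j] % 2 == 0) == p:
--             j += 1
--         run = arr[i:j]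
--         res += reversed(run) if p else run
--         i = j
--     return res
-- ===== Notes on version B (the rewrite author's own statement) =====
-- stated objective: alternative
-- what changed: B splits the list into maximal runs of equal parity and emits each whole run (reversed if even) instead of A's running even-buffer flushed at every odd element.
import Mathlib
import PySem

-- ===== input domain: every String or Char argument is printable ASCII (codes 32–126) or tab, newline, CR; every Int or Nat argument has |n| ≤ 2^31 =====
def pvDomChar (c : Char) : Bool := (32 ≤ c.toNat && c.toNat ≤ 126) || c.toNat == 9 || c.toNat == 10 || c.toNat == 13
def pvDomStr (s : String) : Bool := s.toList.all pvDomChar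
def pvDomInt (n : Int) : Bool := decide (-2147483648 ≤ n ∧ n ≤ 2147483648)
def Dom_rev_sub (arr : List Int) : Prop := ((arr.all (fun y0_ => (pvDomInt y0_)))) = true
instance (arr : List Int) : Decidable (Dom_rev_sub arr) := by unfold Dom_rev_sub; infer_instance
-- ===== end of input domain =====

-- B reworks A's running even-buffer into maximal same-parity runs, each emitted whole (reversed when even): alternative decomposition, same cost.

-- ===== PORT A =====
-- A's for-loop over arr with state (r, even), flushed at the end: a structural recursion over the same state.
def revAloop (arr r even : List Int) : List Int :=
  match arr with
  | [] => r ++ even.reverse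
  | a :: t =>
    if a % 2 = 0 then revAloop t r (even ++ [a])
    else revAloop t (r ++ even.reverse ++ [a]) []

def rev_sub (arr : List Int) : List Int := revAloop arr [] []

-- ===== PORT B =====
-- Source B's run predicate: (x % 2 == 0) == p where p is the run head's parity flag
def sameParity (a : Int) : Int → Bool := fun x => decide (x % 2 = 0) == decide (a % 2 = 0)

-- Source B's outer while loop: take the maximal run with the head's parity, emit it (reversed if even), continue on the rest.
def rev_sub_alt (arr : List Int) : List Int :=
  match arr with
  | [] => []
  | a :: t =>
    let run := (a :: t).takeWhile (sameParity a)
    let rest := (a :: t).dropWhile (sameParity a)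
    (if a % 2 = 0 then run.reverse else run) ++ rev_sub_alt rest
termination_by arr.length
decreasing_by
  rw [List.dropWhile_cons_of_pos (by simp [sameParity])]
  exact Nat.lt_succ_of_le (List.length_dropWhile_le _ _)

-- ===== PRECONDITION & SPEC =====
def Spec_rev_sub (arr : List Int) (out : List Int) : Prop := out = rev_sub_alt arr
instance (arr : List Int) (out : List Int) : Decidable (Spec_rev_sub arr out) := by unfold Spec_rev_sub; infer_instance

-- ===== CLAIM (what is proved, stated in full; the proofs are below) =====
def Claim_equal_rev_sub : Prop := ∀ (arr : List Int), Dom_rev_sub arr → Spec_rev_sub arr (rev_sub arr)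

-- ===== LEMMAS AND PROOFS =====

theorem alt_nil : rev_sub_alt [] = [] := by rw [rev_sub_alt.eq_def]

theorem alt_cons (a : Int) (t : List Int) :
    rev_sub_alt (a :: t) =
      (if a % 2 = 0 then ((a :: t).takeWhile (sameParity a)).reverse
       else (a :: t).takeWhile (sameParity a)) ++
      rev_sub_alt ((a :: t).dropWhile (sameParity a)) := by
  rw [rev_sub_alt.eq_def]

-- takeWhile/dropWhile distribute over a prefix on which p holds everywhere
theorem takeWhile_append_all {α : Type} (p : α → Bool) (b l : List α)
    (hb : ∀ x ∈ b, p x = true) :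
    (b ++ l).takeWhile p = b ++ l.takeWhile p := by
  induction b with
  | nil => simp
  | cons e b ih =>
    rw [List.cons_append, List.takeWhile_cons_of_pos (hb e (by simp)), List.cons_append,
      ih (fun x hx => hb x (by simp [hx]))]

theorem dropWhile_append_all {α : Type} (p : α → Bool) (b l : List α)
    (hb : ∀ x ∈ b, p x = true) :
    (b ++ l).dropWhile p = l.dropWhile p := by
  induction b with
  | nil => simp
  | cons e b ih =>
    rw [List.cons_append, List.dropWhile_cons_of_pos (hb e (by simp)),
      ih (fun x hx => hb x (by simp [hx]))]

-- peeling one odd element off the front of rev_sub_alt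
theorem alt_odd_cons (a : Int) (t : List Int) (ha : ¬ a % 2 = 0) :
    rev_sub_alt (a :: t) = a :: rev_sub_alt t := by
  rw [alt_cons, if_neg ha, List.takeWhile_cons_of_pos (by simp [sameParity]),
    List.dropWhile_cons_of_pos (by simp [sameParity]), List.cons_append]
  cases t with
  | nil => simp [alt_nil]
  | cons h t' =>
    by_cases hh : h % 2 = 0
    · have hf : ¬ sameParity a h = true := by simp [sameParity, ha, hh]
      rw [List.takeWhile_cons_of_neg hf, List.dropWhile_cons_of_neg hf]
      simp
    · have hfun : sameParity a = sameParity h := by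
        funext x; simp [sameParity, ha, hh]
      rw [hfun]
      conv_rhs => rw [alt_cons, if_neg hh]

-- an all-even prefix followed by [] or an odd-headed list is emitted reversed, then the rest processed
theorem alt_even_prefix (b l : List Int) (hb : ∀ x ∈ b, x % 2 = 0)
    (hl : l = [] ∨ ∃ a t, l = a :: t ∧ ¬ a % 2 = 0) :
    rev_sub_alt (b ++ l) = b.reverse ++ rev_sub_alt l := by
  cases b with
  | nil => simp
  | cons e b' =>
    have he : e % 2 = 0 := hb e (by simp)
    have hball : ∀ x ∈ e :: b', sameParity e x = true := by
      intro x hx; simp [sameParity, hb x hx, he]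
    have hltake : l.takeWhile (sameParity e) = [] := by
      rcases hl with rfl | ⟨a, t, rfl, ha⟩
      · rfl
      · exact List.takeWhile_cons_of_neg (by simp [sameParity, he, ha])
    have hldrop : l.dropWhile (sameParity e) = l := by
      rcases hl with rfl | ⟨a, t, rfl, ha⟩
      · rfl
      · exact List.dropWhile_cons_of_neg (by simp [sameParity, he, ha])
    have hcons : (e :: b') ++ l = e :: (b' ++ l) := rfl
    rw [hcons, alt_cons, if_pos he, ← hcons,
      takeWhile_append_all _ _ _ hball, dropWhile_append_all _ _ _ hball, hltake, hldrop]
    simp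

-- the loop invariant: A's loop with pending even-buffer b equals B on b ++ arr
theorem loop_invariant (arr : List Int) : ∀ (r b : List Int), (∀ x ∈ b, x % 2 = 0) →
    revAloop arr r b = r ++ rev_sub_alt (b ++ arr) := by
  induction arr with
  | nil =>
    intro r b hb
    have h := alt_even_prefix b [] hb (Or.inl rfl)
    rw [List.append_nil] at h
    rw [revAloop, List.append_nil, h, alt_nil]
    simp
  | cons a t ih =>
    intro r b hb
    by_cases ha : a % 2 = 0
    · have hba : ∀ x ∈ b ++ [a], x % 2 = 0 := by
        intro x hx
        rcases List.mem_append.mp hx with h | h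
        · exact hb x h
        · rw [List.mem_singleton] at h; subst h; exact ha
      rw [revAloop, if_pos ha, ih r (b ++ [a]) hba]
      simp
    · rw [revAloop, if_neg ha, ih _ [] (by intro x hx; cases hx), List.nil_append,
        alt_even_prefix b (a :: t) hb (Or.inr ⟨a, t, rfl, ha⟩), alt_odd_cons a t ha]
      simp

-- ===== VERDICT (by name: the statement is the Claim_ definition above) =====
theorem rev_sub_spec : Claim_equal_rev_sub := by
  intro arr _
  show rev_sub arr = rev_sub_alt arr
  rw [rev_sub, loop_invariant arr [] [] (by intro x hx; cases hx)]
  simp
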